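-- pv_equiv track=rewrite | github.com/DominicKlukas/NumericalAnalysis | main.py | sequentially_arriving_customer_types
-- ===== SOURCE A (Python) =====
-- def sequentially_arriving_customer_types(customer_list, seed, T):
--     num_customers = len(customer_list)
--     segment_length = int(T / num_customers)
--     final_segment = T - segment_length*(num_customers-1)
--     arriving_customer_types = []
--     for i in range(num_customers - 1):
--         arriving_customer_types += [customer_list[i]]*segment_length
--     arriving_customer_types += [customer_list[num_customers-1]]*final_segment
--     return arriving_customer_types
-- ===== SOURCE B (Python) =====
-- def sequentially_arriving_customer_types(customer_list, seed, T):
--     num_customers = len(customer_list)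
--     segment_length = int(T / num_customers)
--     if segment_length <= 0:
--         return [customer_list[-1]] * T
--     return [customer_list[min(t // segment_length, num_customers - 1)] for t in range(T)]
-- ===== Notes on version B (the rewrite author's own statement) =====
-- stated objective: alternative
-- what changed: B builds the result in a single comprehension over the T output positions, mapping each position t to its customer via integer division t // segment_length clamped to the last index, instead of concatenating per-customer blocks of repeated elements.
import Mathlib
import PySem

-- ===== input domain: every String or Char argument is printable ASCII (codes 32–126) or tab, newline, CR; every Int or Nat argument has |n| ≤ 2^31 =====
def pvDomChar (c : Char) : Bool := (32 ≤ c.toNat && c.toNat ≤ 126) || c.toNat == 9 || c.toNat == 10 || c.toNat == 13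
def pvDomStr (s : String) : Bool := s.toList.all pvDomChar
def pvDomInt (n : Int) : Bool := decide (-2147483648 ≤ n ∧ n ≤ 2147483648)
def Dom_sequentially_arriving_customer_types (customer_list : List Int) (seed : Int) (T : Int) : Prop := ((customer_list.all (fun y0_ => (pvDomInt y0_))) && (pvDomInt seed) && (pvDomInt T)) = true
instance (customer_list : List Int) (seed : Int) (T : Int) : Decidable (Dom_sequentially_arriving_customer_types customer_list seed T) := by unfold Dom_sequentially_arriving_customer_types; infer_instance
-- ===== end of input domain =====

-- B builds the result by mapping each of the T output positions to its customer via clamped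
-- integer division, instead of concatenating per-customer blocks; same cost, different decomposition.

-- ===== PORT A =====
-- int(T / num_customers) is float division truncated toward zero; on Dom (|T| ≤ 2^31 < 2^53,
-- 1 ≤ num_customers) the float quotient never rounds across an integer, so it equals exact
-- truncating division, ported as PySem.Int.truncdiv (exact there).  [x]*k is
-- List.replicate k.toNat x (empty for k ≤ 0, as in Python).
def sequentially_arriving_customer_types (customer_list : List Int) (seed : Int) (T : Int) : List Int :=
  let num_customers : Int := (customer_list.length : Int)
  let segment_length : Int := PySem.Int.truncdiv T num_customers
  let final_segment : Int := T - segment_length * (num_customers - 1)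
  let body : List Int := (PySem.List.pyRange 0 (num_customers - 1) 1).foldl
    (fun acc i => acc ++ List.replicate segment_length.toNat (PySem.List.pyGetD customer_list i 0)) []
  body ++ List.replicate final_segment.toNat (PySem.List.pyGetD customer_list (num_customers - 1) 0)

-- ===== PORT B =====
def sequentially_arriving_customer_types_alt (customer_list : List Int) (seed : Int) (T : Int) : List Int :=
  let num_customers : Int := (customer_list.length : Int)
  let segment_length : Int := PySem.Int.truncdiv T num_customers
  if segment_length ≤ 0 then
    List.replicate T.toNat (PySem.List.pyGetD customer_list (-1) 0)
  else
    (PySem.List.pyRange 0 T 1).map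
      (fun t => PySem.List.pyGetD customer_list
        (min (PySem.Int.floordiv t segment_length) (num_customers - 1)) 0)

-- ===== PRECONDITION & SPEC =====
-- Pre_ excludes only the empty customer_list, on which the Python A raises ZeroDivisionError.
def Pre_sequentially_arriving_customer_types (customer_list : List Int) (seed : Int) (T : Int) : Prop :=
  customer_list ≠ []
instance (customer_list : List Int) (seed : Int) (T : Int) : Decidable (Pre_sequentially_arriving_customer_types customer_list seed T) := by unfold Pre_sequentially_arriving_customer_types; infer_instance
def pvWitness_sequentially_arriving_customer_types : List Int × Int × Int := ([1, 2, 3], 0, 7)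

def Spec_sequentially_arriving_customer_types (customer_list : List Int) (seed : Int) (T : Int) (out : List Int) : Prop := out = sequentially_arriving_customer_types_alt customer_list seed T
instance (customer_list : List Int) (seed : Int) (T : Int) (out : List Int) : Decidable (Spec_sequentially_arriving_customer_types customer_list seed T out) := by unfold Spec_sequentially_arriving_customer_types; infer_instance

-- ===== CLAIM (what is proved, stated in full; the proofs are below) =====
def Claim_equal_sequentially_arriving_customer_types : Prop := ∀ (customer_list : List Int) (seed : Int) (T : Int), Dom_sequentially_arriving_customer_types customer_list seed T → Pre_sequentially_arriving_customer_types customer_list seed T → Spec_sequentially_arriving_customer_types customer_list seed T (sequentially_arriving_customer_types customer_list seed T)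

-- ===== LEMMAS AND PROOFS =====

-- A's loop 'acc += block' is a flatMap.
theorem pv_foldl_append_flat {α β : Type} (l : List α) (g : α → List β) (acc : List β) :
    l.foldl (fun a x => a ++ g x) acc = acc ++ l.flatMap g := by
  induction l generalizing acc with
  | nil => simp
  | cons x xs ih => simp [List.foldl_cons, ih, List.append_assoc]

theorem pv_map_const_range {α : Type} (n : Nat) (c : α) :
    (List.range n).map (fun _ => c) = List.replicate n c := by
  induction n with
  | zero => simp
  | succ k ih => simp [List.range_succ, ih, List.replicate_succ']

-- Core combinatorial fact: indexing the s*m + fin positions by division clamped to m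
-- reproduces the block concatenation (m leading blocks of length s > 0, final block fin).
theorem pv_core {α : Type} (s : Nat) (hs : 0 < s) (m fin : Nat) (f : Nat → α) :
    (List.range (s * m + fin)).map (fun k => f (min (k / s) m)) =
      (List.range m).flatMap (fun i => List.replicate s (f i)) ++ List.replicate fin (f m) := by
  induction m generalizing f with
  | zero =>
    simp only [Nat.mul_zero, Nat.zero_add, List.range_zero, List.flatMap_nil, List.nil_append,
      Nat.min_zero]
    exact pv_map_const_range fin (f 0)
  | succ m ih =>
    have hsplit : s * (m + 1) + fin = s + (s * m + fin) := by ring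
    rw [hsplit, List.range_add, List.map_append, List.map_map]
    rw [List.range_succ_eq_map, List.flatMap_cons, List.flatMap_map, List.append_assoc]
    congr 1
    · -- the first block: every k < s has k / s = 0
      rw [show (List.range s).map (fun k => f (min (k / s) (m + 1)))
            = (List.range s).map (fun _ => f 0) from
          List.map_congr_left (fun k hk => by
            have : k / s = 0 := Nat.div_eq_of_lt (List.mem_range.mp hk)
            simp [this])]
      exact pv_map_const_range s (f 0)
    · -- the remaining positions, shifted by s
      have hstep : ∀ x : Nat, min ((s + x) / s) (m + 1) = min (x / s) m + 1 := by
        intro x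
        have : (x + s) / s = x / s + 1 := Nat.add_div_right x hs
        rw [Nat.add_comm s x, this]
        omega
      calc (List.range (s * m + fin)).map ((fun k => f (min (k / s) (m + 1))) ∘ fun x => s + x)
          = (List.range (s * m + fin)).map (fun x => (fun i => f (i + 1)) (min (x / s) m)) := by
            apply List.map_congr_left; intro x _; simp [Function.comp, hstep x]
        _ = (List.range m).flatMap (fun i => List.replicate s (f (i + 1)))
              ++ List.replicate fin (f (m + 1)) := ih (fun i => f (i + 1))
        _ = (List.range m).flatMap ((fun i => List.replicate s (f i)) ∘ Nat.succ)
              ++ List.replicate fin (f (m + 1)) := by rfl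

-- ===== VERDICT (by name: the statement is the Claim_ definition above) =====
theorem sequentially_arriving_customer_types_spec : Claim_equal_sequentially_arriving_customer_types := by
  intro cl seed T _hdom hpre
  unfold Spec_sequentially_arriving_customer_types
  simp only [sequentially_arriving_customer_types, sequentially_arriving_customer_types_alt]
  have htd : PySem.Int.truncdiv = Int.tdiv := rfl
  have hfd : PySem.Int.floordiv = Int.fdiv := rfl
  simp only [htd, hfd]
  have hn1 : 1 ≤ cl.length := List.length_pos_of_ne_nil hpre
  have hnpos : (0 : Int) < (cl.length : Int) := by exact_mod_cast hn1
  have hq : (cl.length : Int) * (T / (cl.length : Int)) + T % (cl.length : Int) = T :=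
    Int.mul_ediv_add_emod T (cl.length : Int)
  have hr0 : 0 ≤ T % (cl.length : Int) := Int.emod_nonneg T (by omega)
  have hrn : T % (cl.length : Int) < (cl.length : Int) := Int.emod_lt_of_pos T hnpos
  have hsign : ((cl.length : Int)).sign = 1 := Int.sign_eq_one_iff_pos.mpr hnpos
  have hseg : T.tdiv (cl.length : Int)
      = T / (cl.length : Int) + (if 0 ≤ T ∨ (cl.length : Int) ∣ T then 0 else 1) := by
    rw [Int.tdiv_eq_ediv, hsign]
  have hlast : PySem.List.pyGetD cl ((cl.length : Int) - 1) 0 = cl.getD (cl.length - 1) 0 := by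
    have hc : ((cl.length : Int)) - 1 = ((cl.length - 1 : Nat) : Int) := by omega
    rw [hc, PySem.List.pyGetD_natCast]
  by_cases hsle : T.tdiv (cl.length : Int) ≤ 0
  · -- segment_length ≤ 0: A's loop contributes nothing; B takes the replicate branch
    rw [if_pos hsle]
    have hz : (T.tdiv (cl.length : Int)).toNat = 0 := Int.toNat_eq_zero.mpr hsle
    have hbody : (PySem.List.pyRange 0 ((cl.length : Int) - 1) 1).foldl
        (fun acc i => acc ++ List.replicate (T.tdiv (cl.length : Int)).toNat
          (PySem.List.pyGetD cl i 0)) [] = [] := by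
      simp [hz]
    rw [hbody, List.nil_append]
    by_cases hT : 0 ≤ T
    · -- 0 ≤ T < num_customers: segment_length = 0, final_segment = T
      have hq0 : 0 ≤ T / (cl.length : Int) := Int.ediv_nonneg hT (le_of_lt hnpos)
      have hseg0 : T.tdiv (cl.length : Int) = 0 := by
        rw [hseg, if_pos (Or.inl hT)]; rw [hseg, if_pos (Or.inl hT)] at hsle; omega
      rw [hseg0]
      have hval : PySem.List.pyGetD cl (-1) 0 = cl.getD (cl.length - 1) 0 := by
        rw [PySem.List.pyGetD_neg_one cl 0 hpre, List.getLast_eq_getElem,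
          List.getD_eq_getElem cl 0 (by omega)]
      rw [hval, hlast]
      norm_num
    · -- T < 0: both sides are empty
      have hTn : T ≤ (cl.length : Int) * (T.tdiv (cl.length : Int)) := by
        by_cases hdvd : (cl.length : Int) ∣ T
        · have hr : T % (cl.length : Int) = 0 := Int.emod_eq_zero_of_dvd hdvd
          rw [hseg, if_pos (Or.inr hdvd)]
          linarith
        · rw [hseg, if_neg (by tauto)]
          have hx : (cl.length : Int) * (T / (cl.length : Int) + 1)
              = (cl.length : Int) * (T / (cl.length : Int)) + (cl.length : Int) := by ring
          linarith
      have hring : T.tdiv (cl.length : Int) * ((cl.length : Int) - 1)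
          = (cl.length : Int) * (T.tdiv (cl.length : Int)) - T.tdiv (cl.length : Int) := by ring
      have hfin0 : (T - T.tdiv (cl.length : Int) * ((cl.length : Int) - 1)).toNat = 0 :=
        Int.toNat_eq_zero.mpr (by linarith)
      have hT0 : T.toNat = 0 := Int.toNat_eq_zero.mpr (by omega)
      rw [hfin0, hT0]
      simp
  · -- segment_length > 0: the block decomposition matches clamped-division indexing
    rw [if_neg hsle]
    have hT : 0 ≤ T := by
      by_contra hneg
      have hqneg : T / (cl.length : Int) < 0 := by
        rcases lt_or_ge (T / (cl.length : Int)) 0 with h | h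
        · exact h
        · have := mul_nonneg (le_of_lt hnpos) h
          linarith
      rw [hseg] at hsle
      split_ifs at hsle <;> omega
    have hsegq : T.tdiv (cl.length : Int) = T / (cl.length : Int) := by
      rw [hseg, if_pos (Or.inl hT)]; ring
    have hqpos : 0 < T / (cl.length : Int) := by rw [hsegq] at hsle; omega
    -- Nat avatars
    have hs : ((T.tdiv (cl.length : Int)).toNat : Int) = T / (cl.length : Int) := by
      rw [Int.toNat_of_nonneg (by omega)]; exact hsegq
    have hfinal : T - T.tdiv (cl.length : Int) * ((cl.length : Int) - 1)
        = T / (cl.length : Int) + T % (cl.length : Int) := by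
      rw [hsegq]; linear_combination -hq
    have hfcast : ((T - T.tdiv (cl.length : Int) * ((cl.length : Int) - 1)).toNat : Int)
        = T / (cl.length : Int) + T % (cl.length : Int) := by
      rw [Int.toNat_of_nonneg (by omega)]; exact hfinal
    have hm : ((cl.length - 1 : Nat) : Int) = (cl.length : Int) - 1 := by omega
    have hTnat : T.toNat = (T.tdiv (cl.length : Int)).toNat * (cl.length - 1)
        + (T - T.tdiv (cl.length : Int) * ((cl.length : Int) - 1)).toNat := by
      have hc : (((T.tdiv (cl.length : Int)).toNat * (cl.length - 1)
          + (T - T.tdiv (cl.length : Int) * ((cl.length : Int) - 1)).toNat : Nat) : Int) = T := by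
        push_cast [hs, hfcast, hm]
        linear_combination hq
      omega
    -- A's side: pyRange + foldl append = flatMap over List.range
    have hrngA : ((cl.length : Int) - 1 - 0).toNat = cl.length - 1 := by omega
    rw [PySem.List.pyRange_one, hrngA, List.foldl_map, pv_foldl_append_flat, List.nil_append]
    -- B's side: pyRange map over List.range
    have hrngB : (T - 0).toNat = T.toNat := by omega
    rw [PySem.List.pyRange_one, hrngB, List.map_map]
    -- pointwise simplification of B's mapped function
    have hdivk : ∀ k : Nat, Int.fdiv ((0 : Int) + (k : Int)) (T.tdiv (cl.length : Int))
        = ((k / (T.tdiv (cl.length : Int)).toNat : Nat) : Int) := by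
      intro k
      rw [zero_add, Int.fdiv_eq_ediv, if_pos (Or.inl (by omega)), Int.natCast_div]
      rw [hs, hsegq]; ring
    have hB : ∀ k : Nat, ((fun t => PySem.List.pyGetD cl
          (min (Int.fdiv t (T.tdiv (cl.length : Int))) ((cl.length : Int) - 1)) 0)
            ∘ fun k : Nat => (0 : Int) + (k : Int)) k
        = cl.getD (min (k / (T.tdiv (cl.length : Int)).toNat) (cl.length - 1)) 0 := by
      intro k
      have hminc : min (((k / (T.tdiv (cl.length : Int)).toNat : Nat)) : Int) ((cl.length : Int) - 1)
          = ((min (k / (T.tdiv (cl.length : Int)).toNat) (cl.length - 1) : Nat) : Int) := by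
        push_cast [Nat.cast_min]
        omega
      simp only [Function.comp, hdivk k, hminc, PySem.List.pyGetD_natCast]
    rw [List.map_congr_left (fun k _ => hB k)]
    -- A's inner blocks
    have hA : ∀ k : Nat, List.replicate (T.tdiv (cl.length : Int)).toNat
          (PySem.List.pyGetD cl ((0 : Int) + (k : Int)) 0)
        = List.replicate (T.tdiv (cl.length : Int)).toNat (cl.getD k 0) := by
      intro k
      rw [zero_add, PySem.List.pyGetD_natCast]
    simp only [hA, hlast]
    rw [hTnat]
    have hspos : 0 < (T.tdiv (cl.length : Int)).toNat := by omega
    have hsfin : (T.tdiv (cl.length : Int)).toNat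
        ≤ (T - T.tdiv (cl.length : Int) * ((cl.length : Int) - 1)).toNat := by omega
    exact (pv_core (T.tdiv (cl.length : Int)).toNat hspos (cl.length - 1)
      (T - T.tdiv (cl.length : Int) * ((cl.length : Int) - 1)).toNat
      (fun i => cl.getD i 0)).symm
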